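-- pv_equiv track=rewrite | github.com/yaeba/binary-search-solutions | solutions/Dividing-Station.py | solve
-- ===== SOURCE A (Python) =====
-- def solve(nums):
--     nums = sorted(nums)
--     lst = [{1}]
--
--     for num in nums:
--         idx = len(lst) - 1
--         while all(num % x for x in lst[idx]):
--             idx -= 1
--         if idx + 1 >= len(lst):
--             lst.append(set())
--         lst[idx + 1].add(num)
--
--     return len(lst) - 1
-- ===== SOURCE B (Python) =====
-- def solve(nums):
--     # Longest divisibility-chain DP over distinct values instead of A's
--     # greedy level-bucket placement: level[v] = length of the longest chain
--     # ending at v; answer = running maximum.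
--     level = {}
--     top = 0
--     for num in sorted(nums):
--         lvl = 1 + max((v for d, v in level.items() if d and num % d == 0),
--                       default=0)
--         level[num] = lvl
--         if lvl > top:
--             top = lvl
--     return top
-- ===== Notes on version B (the rewrite author's own statement) =====
-- stated objective: alternative
-- what changed: A greedily places each sorted value into a growing list of level-sets, scanning levels top-down with a while loop and mutating sets; B computes the longest divisibility chain ending at each value with a dict value->chain-length DP and a running maximum, so the level-set structure and the while scan disappear.
-- outside the precondition, e.g. on solve([0]): A returns 1, B returns 1; on solve([-2, 0]): A returns 2, B returns 2
import Mathlib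
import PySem

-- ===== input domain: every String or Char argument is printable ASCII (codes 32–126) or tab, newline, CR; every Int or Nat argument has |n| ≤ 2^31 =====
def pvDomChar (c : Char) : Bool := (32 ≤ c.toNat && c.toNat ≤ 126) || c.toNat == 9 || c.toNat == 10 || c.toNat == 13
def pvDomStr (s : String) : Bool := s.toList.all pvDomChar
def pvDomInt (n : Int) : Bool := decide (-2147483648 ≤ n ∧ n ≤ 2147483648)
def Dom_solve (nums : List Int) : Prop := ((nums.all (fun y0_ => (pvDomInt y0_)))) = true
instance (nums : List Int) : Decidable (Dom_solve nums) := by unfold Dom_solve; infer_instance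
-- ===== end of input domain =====

-- B replaces A's greedy level-bucket placement (a list of sets scanned top-down by a
-- while loop) with a longest-divisibility-chain DP over a dict value -> chain length
-- (objective: alternative structure, same asymptotic cost).

-- ===== PORT A =====
-- `all(num % x for x in lst[idx])` — true iff no element of the set divides num
def pvAllNZ (num : Int) (s : PySem.Set Int) : Bool :=
  s.all (fun x => !(PySem.Int.mod num x == 0))

-- A's `while all(num % x for x in lst[idx]): idx -= 1`, counting down from idx.
-- The Python loop always stops at idx = 0 at the latest, because lst[0] = {1}
-- and num % 1 == 0 makes the condition false there; this countdown is that
-- loop made total (at 0 it returns 0 without re-checking the always-false test).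
def pvFindIdx (num : Int) (lst : List (PySem.Set Int)) : Nat → Nat
  | 0 => 0
  | i + 1 =>
    if pvAllNZ num (lst.getD (i + 1) PySem.Set.empty) then pvFindIdx num lst i
    else i + 1

-- one iteration of A's `for num in nums` body
def pvStepA (lst : List (PySem.Set Int)) (num : Int) : List (PySem.Set Int) :=
  let idx := pvFindIdx num lst (lst.length - 1)
  let lst2 := if lst.length ≤ idx + 1 then lst ++ [PySem.Set.empty] else lst
  lst2.set (idx + 1) (PySem.Set.add (lst2.getD (idx + 1) PySem.Set.empty) num)

def solve (nums : List Int) : Int :=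
  let lst := (PySem.List.sorted nums (fun x => x) false).foldl pvStepA [PySem.Set.ofList [1]]
  (lst.length : Int) - 1

-- ===== PORT B =====
-- `max((v for d, v in level.items() if d and num % d == 0), default=0)`
def pvBestPred (level : PySem.Dict Int Int) (num : Int) : Int :=
  (PySem.List.max?
      ((level.items.filter
          (fun dv => !(dv.1 == 0) && PySem.Int.mod num dv.1 == 0)).map (fun dv => dv.2))
      (fun v => v)).getD 0

-- one iteration of B's loop: state = (level dict, running maximum)
def pvStepB (st : PySem.Dict Int Int × Int) (num : Int) : PySem.Dict Int Int × Int :=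
  let lvl := 1 + pvBestPred st.1 num
  (st.1.insert num lvl, if st.2 < lvl then lvl else st.2)

def solve_alt (nums : List Int) : Int :=
  ((PySem.List.sorted nums (fun x => x) false).foldl pvStepB (PySem.Dict.empty, 0)).2

-- ===== PRECONDITION & SPEC =====
-- Pre_ excludes lists containing 0: once 0 has been placed, A evaluates `num % 0`
-- for every element processed after it and raises ZeroDivisionError (A returns a
-- value only on those 0-lists in which nothing is processed after the 0).
def Pre_solve (nums : List Int) : Prop := (0 : Int) ∉ nums
instance (nums : List Int) : Decidable (Pre_solve nums) := by unfold Pre_solve; infer_instance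

def pvWitness_solve : List Int := [6, 2, 3, 12, 5]

def Spec_solve (nums : List Int) (out : Int) : Prop := out = solve_alt nums
instance (nums : List Int) (out : Int) : Decidable (Spec_solve nums out) := by unfold Spec_solve; infer_instance

-- ===== CLAIM (what is proved, stated in full; the proofs are below) =====
def Claim_equal_solve : Prop := ∀ (nums : List Int), Dom_solve nums → Pre_solve nums → Spec_solve nums (solve nums)

-- ===== LEMMAS AND PROOFS =====

-- The invariant tying A's list of level sets to B's (dict, running max) after both
-- have processed the same prefix of the sorted input: A's list is one longer than
-- B's running max; every set element is nonzero; B's dict maps each placed value to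
-- the highest level at which it occurs in A's list, and every occurrence of a value
-- in A's list is at a level no higher than its dict entry.
structure PvInv (lst : List (PySem.Set Int)) (best : PySem.Dict Int Int) (top : Int) : Prop where
  len : (lst.length : Int) = top + 1
  top_nonneg : 0 ≤ top
  nz : ∀ (k : Nat) (x : Int), x ∈ lst.getD k PySem.Set.empty → x ≠ 0
  nodup : best.keys.Nodup
  sound : ∀ (d v : Int), best.get? d = some v →
    1 ≤ v ∧ v ≤ top ∧ d ∈ lst.getD v.toNat PySem.Set.empty
  compl : ∀ (k : Nat) (d : Int), 1 ≤ k → d ∈ lst.getD k PySem.Set.empty →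
    ∃ v, best.get? d = some v ∧ (k : Int) ≤ v

theorem pvAllNZ_false_iff (num : Int) (s : PySem.Set Int) :
    pvAllNZ num s = false ↔ ∃ x ∈ s, PySem.Int.mod num x = 0 := by
  simp [pvAllNZ]

theorem pvFindIdx_le (num : Int) (lst : List (PySem.Set Int)) (i : Nat) :
    pvFindIdx num lst i ≤ i := by
  induction i with
  | zero => simp [pvFindIdx]
  | succ i ih =>
    unfold pvFindIdx
    split
    · exact Nat.le_trans ih (by omega)
    · exact Nat.le_refl _

theorem pvFindIdx_spec (num : Int) (lst : List (PySem.Set Int)) (i m : Nat)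
    (hm : m ≤ i)
    (hup : ∀ k, m < k → k ≤ i → pvAllNZ num (lst.getD k PySem.Set.empty) = true)
    (hlo : m = 0 ∨ pvAllNZ num (lst.getD m PySem.Set.empty) = false) :
    pvFindIdx num lst i = m := by
  induction i with
  | zero => unfold pvFindIdx; omega
  | succ i ih =>
    by_cases hmi : m = i + 1
    · subst hmi
      rcases hlo with h0 | hfalse
      · omega
      · have hne : ¬ pvAllNZ num (lst.getD (i + 1) PySem.Set.empty) = true := by
          rw [hfalse]; simp
        unfold pvFindIdx
        rw [if_neg hne]
    · have hup' := hup (i + 1) (by omega) (Nat.le_refl _)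
      unfold pvFindIdx
      rw [if_pos hup']
      exact ih (by omega) (fun k hk1 hk2 => hup k hk1 (by omega))

-- membership in the value list B maximises over
theorem pvVals_mem_iff (level : PySem.Dict Int Int) (num v : Int)
    (hnd : level.keys.Nodup) :
    v ∈ (level.items.filter
          (fun dv => !(dv.1 == 0) && PySem.Int.mod num dv.1 == 0)).map (fun dv => dv.2) ↔
      ∃ d, level.get? d = some v ∧ d ≠ 0 ∧ PySem.Int.mod num d = 0 := by
  constructor
  · rintro h
    simp only [List.mem_map, List.mem_filter] at h
    obtain ⟨⟨d, w⟩, ⟨hmem, hp⟩, hv⟩ := h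
    simp at hp hv
    subst hv
    exact ⟨d, (PySem.Dict.get?_eq_some_iff_mem_items level d w hnd).2 hmem, hp.1, hp.2⟩
  · rintro ⟨d, hget, hd0, hmod⟩
    simp only [List.mem_map, List.mem_filter]
    exact ⟨(d, v), ⟨(PySem.Dict.get?_eq_some_iff_mem_items level d v hnd).1 hget,
      by simp [hd0, hmod]⟩, rfl⟩

-- characterisation of B's max(..., default=0)
theorem pvBestPred_spec (level : PySem.Dict Int Int) (num : Int)
    (hnd : level.keys.Nodup) :
    (pvBestPred level num = 0 ∨
      ∃ d, level.get? d = some (pvBestPred level num) ∧ d ≠ 0 ∧ PySem.Int.mod num d = 0) ∧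
    (∀ d v, level.get? d = some v → d ≠ 0 → PySem.Int.mod num d = 0 →
      v ≤ pvBestPred level num) := by
  unfold pvBestPred
  rcases hmax : PySem.List.max?
      ((level.items.filter
          (fun dv => !(dv.1 == 0) && PySem.Int.mod num dv.1 == 0)).map (fun dv => dv.2))
      (fun v => v) with _ | m
  · rw [hmax]
    simp only [Option.getD_none]
    refine ⟨Or.inl (by simp), ?_⟩
    intro d v hget hd0 hmod
    have hnil := (PySem.List.max?_eq_none_iff _ _).1 hmax
    have hv := (pvVals_mem_iff level num v hnd).2 ⟨d, hget, hd0, hmod⟩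
    rw [hnil] at hv
    cases hv
  · rw [hmax]
    simp only [Option.getD_some]
    constructor
    · exact Or.inr ((pvVals_mem_iff level num m hnd).1 (PySem.List.max?_mem hmax))
    · intro d v hget hd0 hmod
      simpa using PySem.List.max?_isMax hmax v
        ((pvVals_mem_iff level num v hnd).2 ⟨d, hget, hd0, hmod⟩)

-- what one A-step does to every level set
theorem pvStepA_getD (lst : List (PySem.Set Int)) (num : Int) (j : Nat)
    (hj : pvFindIdx num lst (lst.length - 1) = j) (hlen : 1 ≤ lst.length) (k : Nat) :
    (pvStepA lst num).getD k PySem.Set.empty =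
      (if k = j + 1 then PySem.Set.add (lst.getD (j + 1) PySem.Set.empty) num
       else lst.getD k PySem.Set.empty) := by
  have hjle : j ≤ lst.length - 1 := hj ▸ pvFindIdx_le num lst (lst.length - 1)
  simp only [pvStepA]
  rw [hj]
  by_cases happ : lst.length ≤ j + 1
  · have hjl : j + 1 = lst.length := by omega
    rw [if_pos happ]
    have hA : (lst ++ [PySem.Set.empty]).getD (j + 1) PySem.Set.empty = PySem.Set.empty := by
      rw [List.getD_eq_getElem?_getD, hjl, List.getElem?_concat_length]; rfl
    have hA' : lst.getD (j + 1) PySem.Set.empty = PySem.Set.empty := by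
      rw [List.getD_eq_getElem?_getD, List.getElem?_eq_none (by omega)]; rfl
    rw [hA, hA']
    by_cases hk : k = j + 1
    · subst hk
      rw [if_pos rfl, List.getD_eq_getElem?_getD,
        List.getElem?_set_self (by simp; omega)]
      rfl
    · rw [if_neg hk, List.getD_eq_getElem?_getD,
        List.getElem?_set_ne (fun h => hk h.symm), List.getD_eq_getElem?_getD]
      by_cases hklt : k < lst.length
      · rw [List.getElem?_append_left hklt]
      · rw [List.getElem?_append_right (by omega),
          List.getElem?_eq_none (by simp; omega), List.getElem?_eq_none (by omega)]
  · rw [if_neg happ]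
    by_cases hk : k = j + 1
    · subst hk
      rw [if_pos rfl, List.getD_eq_getElem?_getD, List.getElem?_set_self (by omega)]
      rfl
    · rw [if_neg hk, List.getD_eq_getElem?_getD,
        List.getElem?_set_ne (fun h => hk h.symm)]
      exact (List.getD_eq_getElem?_getD).symm

theorem pvStepA_length (lst : List (PySem.Set Int)) (num : Int) (j : Nat)
    (hj : pvFindIdx num lst (lst.length - 1) = j) :
    (pvStepA lst num).length =
      (if lst.length ≤ j + 1 then lst.length + 1 else lst.length) := by
  simp only [pvStepA]
  rw [hj]
  split_ifs with h <;> simp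

-- one parallel step preserves the invariant
theorem pvStep_inv (lst : List (PySem.Set Int)) (best : PySem.Dict Int Int) (top num : Int)
    (hI : PvInv lst best top) (hnum : num ≠ 0) :
    PvInv (pvStepA lst num) ((pvStepB (best, top) num).1) ((pvStepB (best, top) num).2) := by
  obtain ⟨hlen, htop, hnz, hnodup, hsound, hcompl⟩ := hI
  obtain ⟨hhit, hub⟩ := pvBestPred_spec best num hnodup
  set M := pvBestPred best num with hM
  have hMb : 0 ≤ M ∧ M ≤ top := by
    rcases hhit with h0 | ⟨d, hget, -, -⟩
    · omega
    · have := hsound d M hget; omega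
  have hidx : pvFindIdx num lst (lst.length - 1) = M.toNat := by
    apply pvFindIdx_spec
    · omega
    · intro k hk1 hk2
      by_contra hfalse
      have hf : pvAllNZ num (lst.getD k PySem.Set.empty) = false := by
        cases h : pvAllNZ num (lst.getD k PySem.Set.empty)
        · rfl
        · exact absurd h hfalse
      obtain ⟨x, hxmem, hxmod⟩ := (pvAllNZ_false_iff _ _).1 hf
      obtain ⟨v, hvget, hkv⟩ := hcompl k x (by omega) hxmem
      have hx0 := hnz k x hxmem
      have := hub x v hvget hx0 hxmod
      omega
    · rcases hhit with h0 | ⟨d, hget, hd0, hmod⟩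
      · left; omega
      · right
        obtain ⟨-, -, h3⟩ := hsound d M hget
        exact (pvAllNZ_false_iff _ _).2 ⟨d, h3, hmod⟩
  have hlen1 : 1 ≤ lst.length := by omega
  have hgetD := pvStepA_getD lst num M.toNat hidx hlen1
  have hlength := pvStepA_length lst num M.toNat hidx
  have hnz' : ∀ (k : Nat) (x : Int), x ∈ (pvStepA lst num).getD k PySem.Set.empty → x ≠ 0 := by
    intro k x hx
    rw [hgetD k] at hx
    split_ifs at hx with hk
    · rcases (PySem.Set.mem_add _ _ _).1 hx with h | h
      · exact hnz _ x h
      · exact h ▸ hnum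
    · exact hnz k x hx
  have hsound' : ∀ (T : Int), top ≤ T → M + 1 ≤ T → ∀ (d v : Int),
      (best.insert num (1 + M)).get? d = some v →
      1 ≤ v ∧ v ≤ T ∧ d ∈ (pvStepA lst num).getD v.toNat PySem.Set.empty := by
    intro T hT1 hT2 d v hget
    rw [PySem.Dict.get?_insert] at hget
    split_ifs at hget with hd
    · injection hget with hv
      subst hv
      refine ⟨by omega, by omega, ?_⟩
      rw [hgetD, if_pos (by omega)]
      exact (PySem.Set.mem_add _ _ _).2 (Or.inr hd)
    · obtain ⟨h1, h2, h3⟩ := hsound d v hget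
      refine ⟨h1, by omega, ?_⟩
      rw [hgetD]
      split_ifs with hk
      · rw [hk] at h3
        exact (PySem.Set.mem_add _ _ _).2 (Or.inl h3)
      · exact h3
  have hcompl' : ∀ (k : Nat) (d : Int), 1 ≤ k →
      d ∈ (pvStepA lst num).getD k PySem.Set.empty →
      ∃ v, (best.insert num (1 + M)).get? d = some v ∧ (k : Int) ≤ v := by
    intro k d hk hd
    have hmodself : PySem.Int.mod num num = 0 :=
      (PySem.Int.mod_eq_zero_iff_dvd num num).2 dvd_rfl
    rw [hgetD k] at hd
    by_cases hdn : d = num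
    · refine ⟨1 + M, by rw [PySem.Dict.get?_insert, if_pos hdn], ?_⟩
      split_ifs at hd with hkM
      · omega
      · obtain ⟨v, hvget, hkv⟩ := hcompl k d hk hd
        have := hub num v (hdn ▸ hvget) hnum hmodself
        omega
    · have hd' : d ∈ lst.getD k PySem.Set.empty ∨
          (k = M.toNat + 1 ∧ d ∈ lst.getD (M.toNat + 1) PySem.Set.empty) := by
        split_ifs at hd with hkM
        · rcases (PySem.Set.mem_add _ _ _).1 hd with h | h
          · exact Or.inr ⟨hkM, h⟩
          · exact absurd h hdn
        · exact Or.inl hd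
      rcases hd' with h | ⟨hkM, h⟩
      · obtain ⟨v, hvget, hkv⟩ := hcompl k d hk h
        exact ⟨v, by rw [PySem.Dict.get?_insert, if_neg hdn]; exact hvget, hkv⟩
      · obtain ⟨v, hvget, hkv⟩ := hcompl (M.toNat + 1) d (by omega) h
        exact ⟨v, by rw [PySem.Dict.get?_insert, if_neg hdn]; exact hvget, by omega⟩
  have hnodup' := PySem.Dict.nodup_keys_insert best num (1 + M) hnodup
  simp only [pvStepB]
  rw [← hM]
  by_cases hc : top < 1 + M
  · rw [if_pos hc]
    refine ⟨?_, by omega, hnz', hnodup', hsound' (1 + M) (by omega) (by omega), hcompl'⟩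
    rw [hlength, if_pos (by omega)]
    omega
  · rw [if_neg hc]
    refine ⟨?_, htop, hnz', hnodup', hsound' top (le_refl top) (by omega), hcompl'⟩
    rw [hlength, if_neg (by omega)]
    omega

theorem pvFold_inv (l : List Int) :
    ∀ (lst : List (PySem.Set Int)) (st : PySem.Dict Int Int × Int),
      (∀ x ∈ l, x ≠ 0) → PvInv lst st.1 st.2 →
      PvInv (l.foldl pvStepA lst) ((l.foldl pvStepB st).1) ((l.foldl pvStepB st).2) := by
  induction l with
  | nil => intro lst st _ h; simpa using h
  | cons a l ih =>
    intro lst st hnz h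
    simp only [List.foldl_cons]
    exact ih (pvStepA lst a) (pvStepB st a)
      (fun x hx => hnz x (List.mem_cons_of_mem a hx))
      (by simpa using pvStep_inv lst st.1 st.2 a h (hnz a (by simp)))

theorem pvInv_init : PvInv [PySem.Set.ofList [1]] PySem.Dict.empty 0 := by
  refine ⟨by simp, le_refl 0, ?_, by simp [PySem.Dict.keys_empty], ?_, ?_⟩
  · intro k x hx
    match k with
    | 0 => simp [PySem.Set.ofList, PySem.Set.add] at hx; omega
    | k + 1 => simp [PySem.Set.empty] at hx
  · intro d v h
    rw [PySem.Dict.get?_empty] at h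
    cases h
  · intro k d hk hd
    match k with
    | 0 => omega
    | k + 1 => simp [PySem.Set.empty] at hd

-- ===== VERDICT (by name: the statement is the Claim_ definition above) =====
theorem solve_spec : Claim_equal_solve := by
  intro nums _ hpre
  simp only [Spec_solve, solve, solve_alt]
  have hnz : ∀ x ∈ PySem.List.sorted nums (fun x => x) false, x ≠ 0 := by
    intro x hx h0
    exact hpre (h0 ▸ (PySem.List.sorted_perm nums (fun x => x) false).mem_iff.1 hx)
  have h := pvFold_inv (PySem.List.sorted nums (fun x => x) false)
    [PySem.Set.ofList [1]] (PySem.Dict.empty, 0) hnz pvInv_init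
  have := h.len
  omega
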